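-- pv_equiv track=rewrite | github.com/Yuyu-1115/Sprout | exam/contest-pB.py | count_to_date
-- ===== SOURCE A (Python) =====
-- day_list_24 = [31, 29, 31, 30, 31, 30, 31, 31, 30, 31, 30, 31]
--
-- day_list_25 = [31, 28, 31, 30, 31, 30, 31, 31, 30, 31, 30, 31]
--
-- def count_to_date(count):
--     i = 0
--
--     if count > 366:
--         count -= 366
--         while count > day_list_25[i]:
--             count -= day_list_25[i]
--             i += 1
--         count = max(1, count)
--
--         return (2025, i + 1, count)
--     else:
--         while count > day_list_24[i]:
--             count -= day_list_24[i]
--             i += 1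
--         count = max(1, count)
--         return (2024, i + 1, count)
-- ===== SOURCE B (Python) =====
-- day_list_24 = [31, 29, 31, 30, 31, 30, 31, 31, 30, 31, 30, 31]
--
-- day_list_25 = [31, 28, 31, 30, 31, 30, 31, 31, 30, 31, 30, 31]
--
-- # cumulative prefix sums of the two month tables
-- cum_24 = [31, 60, 91, 121, 152, 182, 213, 244, 274, 305, 335, 366]
-- cum_25 = [31, 59, 90, 120, 151, 181, 212, 243, 273, 304, 334, 365]
--
-- def count_to_date(count):
--     if count > 366:
--         year, c, cum = 2025, count - 366, cum_25
--     else: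
--         year, c, cum = 2024, count, cum_24
--     # first month whose cumulative total reaches c; raises for counts past the year end
--     i = next(k for k, t in enumerate(cum) if c <= t)
--     prev = cum[i - 1] if i > 0 else 0
--     return (year, i + 1, max(1, c - prev))
-- ===== Notes on version B (the rewrite author's own statement) =====
-- stated objective: alternative
-- what changed: Replaces A's mutable subtract-and-advance while loop over the month-length tables with a search over precomputed cumulative prefix sums: the month is the first index whose cumulative total reaches the (possibly shifted) count, and the day is the count minus the previous cumulative total, clamped to 1.
import Mathlib
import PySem

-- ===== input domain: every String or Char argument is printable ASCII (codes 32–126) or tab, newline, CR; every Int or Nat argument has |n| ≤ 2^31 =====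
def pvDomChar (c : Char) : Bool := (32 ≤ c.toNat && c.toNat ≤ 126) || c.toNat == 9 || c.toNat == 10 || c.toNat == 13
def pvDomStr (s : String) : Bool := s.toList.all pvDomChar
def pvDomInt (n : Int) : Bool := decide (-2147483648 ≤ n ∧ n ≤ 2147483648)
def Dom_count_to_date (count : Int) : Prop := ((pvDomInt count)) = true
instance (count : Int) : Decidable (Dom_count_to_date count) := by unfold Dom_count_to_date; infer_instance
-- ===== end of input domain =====

-- B re-implements A's subtract-and-advance while loop by searching precomputed cumulative
-- prefix sums for the first total reaching the count (same values, different decomposition; no speed claim).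

-- ===== PORT A =====
def day_list_24 : List Int := [31, 29, 31, 30, 31, 30, 31, 31, 30, 31, 30, 31]
def day_list_25 : List Int := [31, 28, 31, 30, 31, 30, 31, 31, 30, 31, 30, 31]

-- A's while loop: subtract month lengths while count exceeds the current month;
-- the list argument is the suffix of the table from index i, so this is A's loop step for step.
def aLoop : Int → Int → List Int → Int × Int
  | count, i, [] => (i, count)          -- unreachable under Pre_ (Python would raise IndexError here)
  | count, i, d :: ds => if count > d then aLoop (count - d) (i + 1) ds else (i, count)

def count_to_date (count : Int) : Int × Int × Int :=
  if count > 366 then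
    let (i, c) := aLoop (count - 366) 0 day_list_25
    (2025, i + 1, max 1 c)
  else
    let (i, c) := aLoop count 0 day_list_24
    (2024, i + 1, max 1 c)

-- ===== PORT B =====
def cum_24 : List Int := [31, 60, 91, 121, 152, 182, 213, 244, 274, 305, 335, 366]
def cum_25 : List Int := [31, 59, 90, 120, 151, 181, 212, 243, 273, 304, 334, 365]

-- B's generator 'next(k for k, t in enumerate(cum) if c <= t)': first index whose total reaches c
-- (raises in Python past the year end, outside Pre_; findIdx's out-of-range value is never claimed).
def count_to_date_alt (count : Int) : Int × Int × Int :=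
  let (year, c, cum) : Int × Int × List Int :=
    if count > 366 then (2025, count - 366, cum_25) else (2024, count, cum_24)
  let i : Int := (cum.findIdx (fun t => c ≤ t) : Int)
  let prev : Int := if i > 0 then (PySem.List.pyGet? cum (i - 1)).getD 0 else 0
  (year, i + 1, max 1 (c - prev))

-- ===== PRECONDITION & SPEC =====
-- Pre_ excludes exactly the counts past the year end (count > 731), on which both A and B raise
-- (A IndexError off the month table, B StopIteration in its generator).
def Pre_count_to_date (count : Int) : Prop := count ≤ 731
instance (count : Int) : Decidable (Pre_count_to_date count) := by unfold Pre_count_to_date; infer_instance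
def pvWitness_count_to_date : Int := 400

def Spec_count_to_date (count : Int) (out : Int × Int × Int) : Prop := out = count_to_date_alt count
instance (count : Int) (out : Int × Int × Int) : Decidable (Spec_count_to_date count out) := by unfold Spec_count_to_date; infer_instance

-- ===== CLAIM (what is proved, stated in full; the proofs are below) =====
def Claim_equal_count_to_date : Prop := ∀ (count : Int), Dom_count_to_date count → Pre_count_to_date count → Spec_count_to_date count (count_to_date count)

-- ===== LEMMAS AND PROOFS =====

-- Both branches give (2024, 1, 1) for non-positive count.
theorem eq_nonpos (count : Int) (h : count ≤ 0) :
    count_to_date count = count_to_date_alt count := by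
  have h366 : ¬ count > 366 := by omega
  have h31 : ¬ count > 31 := by omega
  have hle : count ≤ 31 := by omega
  simp only [count_to_date, count_to_date_alt, h366, if_false, day_list_24, cum_24, aLoop,
    h31, if_false, List.findIdx, List.findIdx.go]
  simp [hle]

-- The finitely many positive admissible counts, checked by evaluation.
set_option maxRecDepth 4000 in
set_option maxHeartbeats 2000000 in
theorem eq_pos : ∀ n : Fin 731, count_to_date ((n : Nat) + 1) = count_to_date_alt ((n : Nat) + 1) := by decide

-- ===== VERDICT (by name: the statement is the Claim_ definition above) =====
theorem count_to_date_spec : Claim_equal_count_to_date := by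
  intro count _ hpre
  unfold Spec_count_to_date
  rcases le_or_gt count 0 with h | h
  · exact (eq_nonpos count h).symm ▸ rfl
  · have hc : ∃ n : Fin 731, count = ((n : Nat) + 1 : Int) := by
      refine ⟨⟨(count - 1).toNat, ?_⟩, ?_⟩ <;> · simp [Pre_count_to_date] at hpre ⊢; omega
    obtain ⟨n, rfl⟩ := hc
    exact (eq_pos n).symm ▸ rfl
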